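-- pv_equiv track=rewrite | github.com/shell-don/Langages | src/Python/TP/UT1/TD 4 - Chaines.py | comparaison
-- ===== SOURCE A (Python) =====
-- def normalise(chaine: str) -> str :
--     '''
--     Renvoie la chaine normalisé,  tous les espaces en début et fin de chaine sont enlevés,
--     et le mot à l’intérieur de celui-ci est converti en minuscule. (manque)
--
--     '''
--     chaine = ['' if x == ' ' else x for x in chaine]
--     chaine = ''.join(chaine)
--     return chaine.lower()
--
-- def comparaison(mot1: str, mot2: str) -> bool :
--     '''
--     Renvoie vrai si les deux mots sont les mêmes. Ignore les espaces et les majuscules.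
--
--     '''
--     mot1 = normalise(mot1)
--     mot2 = normalise(mot2)
--
--     mot1 = [x for x in mot1]
--     mot2 = [x for x in mot2]
--
--     if len(mot1) !=  len(mot2) :
--         return False
--
--     c: int = 0
--     for i, x in enumerate(mot1) :
--         if x == mot2[i] :
--             c += 1
--     if c == len(mot1) and c == len(mot2) :
--         return True
--     else :
--         return False
-- ===== SOURCE B (Python) =====
-- def comparaison(mot1: str, mot2: str) -> bool:
--     s1 = mot1.lower()
--     s2 = mot2.lower()
--     i, j = 0, 0
--     n1, n2 = len(s1), len(s2)
--     while True:
--         while i < n1 and s1[i] == ' ':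
--             i += 1
--         while j < n2 and s2[j] == ' ':
--             j += 1
--         if i == n1 or j == n2:
--             return i == n1 and j == n2
--         if s1[i] != s2[j]:
--             return False
--         i += 1
--         j += 1
-- ===== Notes on version B (the rewrite author's own statement) =====
-- stated objective: faster
-- what changed: Replaced A's build-two-normalized-lists-then-length-check-and-positional-count pipeline by a single two-pointer scan over the lowercased strings that skips spaces in place and returns on the first mismatch.
import Mathlib
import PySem

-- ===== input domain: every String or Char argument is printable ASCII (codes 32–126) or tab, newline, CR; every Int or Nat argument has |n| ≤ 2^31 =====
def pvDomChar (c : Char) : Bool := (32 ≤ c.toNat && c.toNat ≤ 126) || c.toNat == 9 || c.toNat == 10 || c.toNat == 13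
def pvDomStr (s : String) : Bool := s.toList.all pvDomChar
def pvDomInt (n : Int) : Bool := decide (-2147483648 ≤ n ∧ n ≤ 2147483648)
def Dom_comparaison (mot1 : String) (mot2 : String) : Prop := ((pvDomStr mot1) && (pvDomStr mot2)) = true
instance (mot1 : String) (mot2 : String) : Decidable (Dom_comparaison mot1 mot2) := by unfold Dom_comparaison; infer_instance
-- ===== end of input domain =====

-- B replaces A's list-building + length check + positional counting pass by a single
-- space-skipping two-pointer scan over the lowercased strings (early exit, no intermediate lists).

-- ===== PORT A =====
-- normalise: drop spaces (list comprehension + join), then .lower()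
def normaliseA (chaine : String) : List Char :=
  PySem.Chars.lower ((chaine.toList.map (fun x => if x = ' ' then ([] : List Char) else [x])).flatten)

def comparaison (mot1 : String) (mot2 : String) : Bool :=
  let m1 := normaliseA mot1
  let m2 := normaliseA mot2
  if m1.length ≠ m2.length then false
  else
    let c : Nat :=
      (PySem.List.enumerate m1 0).foldl
        (fun c p => if PySem.List.pyGet? m2 p.1 = some p.2 then c + 1 else c) 0
    if c = m1.length ∧ c = m2.length then true else false

-- ===== PORT B =====
-- two-pointer loop of Source B, as structural recursion over the two char lists
def scanB (xs ys : List Char) : Bool :=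
  match xs, ys with
  | x :: xs', ys =>
      if x = ' ' then scanB xs' ys
      else
        match ys with
        | y :: ys' =>
            if y = ' ' then scanB (x :: xs') ys'
            else if x = y then scanB xs' ys' else false
        | [] => false
  | [], y :: ys' => if y = ' ' then scanB [] ys' else false
  | [], [] => true
termination_by xs.length + ys.length
decreasing_by all_goals (simp_all; try omega)

def comparaison_alt (mot1 : String) (mot2 : String) : Bool :=
  scanB (PySem.Chars.lower mot1.toList) (PySem.Chars.lower mot2.toList)

-- ===== PRECONDITION & SPEC =====
def Spec_comparaison (mot1 : String) (mot2 : String) (out : Bool) : Prop := out = comparaison_alt mot1 mot2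
instance (mot1 : String) (mot2 : String) (out : Bool) : Decidable (Spec_comparaison mot1 mot2 out) := by unfold Spec_comparaison; infer_instance

-- ===== CLAIM (what is proved, stated in full; the proofs are below) =====
def Claim_equal_comparaison : Prop := ∀ (mot1 : String) (mot2 : String), Dom_comparaison mot1 mot2 → Spec_comparaison mot1 mot2 (comparaison mot1 mot2)

-- ===== LEMMAS AND PROOFS =====

-- the comprehension-join of A is a filter
theorem flatten_map_filter (l : List Char) :
    (l.map (fun x => if x = ' ' then ([] : List Char) else [x])).flatten
      = l.filter (fun x => x ≠ ' ') := by
  induction l with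
  | nil => rfl
  | cons x xs ih => by_cases h : x = ' ' <;> simp [h, ih]

-- scanB decides equality of the space-filtered lists
theorem scanB_eq_filter (xs ys : List Char) :
    scanB xs ys = (xs.filter (fun x => x ≠ ' ') == ys.filter (fun x => x ≠ ' ')) := by
  fun_induction scanB xs ys <;> simp_all

-- lowering a Dom character is per-character and never produces/destroys a space
theorem lower_eq_map (l : List Char) : PySem.Chars.lower l = l.map PySem.Chars.lowerChar := by
  rfl

theorem lowerChar_space_iff (c : Char) :
    (PySem.Chars.lowerChar c = ' ') ↔ c = ' ' := by
  constructor
  · intro h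
    by_cases hu : PySem.Chars.isupper c = true
    · exfalso
      have hb : 65 ≤ c.toNat ∧ c.toNat ≤ 90 := by
        simp only [PySem.Chars.isupper, Bool.and_eq_true, decide_eq_true_eq] at hu
        obtain ⟨h1, h2⟩ := hu
        exact ⟨h1, h2⟩
      have hv : (c.toNat + 32).isValidChar := by
        left; omega
      have ht : (PySem.Chars.lowerChar c).toNat = c.toNat + 32 := by
        simp [PySem.Chars.lowerChar, hu, Char.toNat_ofNat, hv]
      rw [h] at ht
      have : (' ').toNat = 32 := rfl
      omega
    · simpa [PySem.Chars.lowerChar, hu] using h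
  · intro h; subst h; decide

-- lower commutes with the space filter on Dom strings
theorem lower_filter_comm (l : List Char) :
    (PySem.Chars.lower l).filter (fun x => x ≠ ' ')
      = PySem.Chars.lower (l.filter (fun x => x ≠ ' ')) := by
  simp only [lower_eq_map]
  induction l with
  | nil => rfl
  | cons x xs ih =>
      by_cases hx : x = ' '
      · subst hx
        simpa [(by decide : PySem.Chars.lowerChar ' ' = ' ')] using ih
      · have h1 : ¬ PySem.Chars.lowerChar x = ' ' := (lowerChar_space_iff x).not.mpr hx
        simpa [hx, h1] using ih

-- A's counting loop over equal-length lists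
theorem count_fold (a rest done : List Char) (c : Nat) (h : a.length = rest.length) :
    (PySem.List.enumerate a (done.length : Int)).foldl
        (fun c p => if PySem.List.pyGet? (done ++ rest) p.1 = some p.2 then c + 1 else c) c
      = c + ((a.zip rest).filter (fun p => p.1 = p.2)).length := by
  induction a generalizing rest done c with
  | nil => simp [PySem.List.enumerate]
  | cons x a' ih =>
      cases rest with
      | nil => simp at h
      | cons y rest' =>
        simp only [List.length_cons, Nat.succ_inj] at h
        have hget : PySem.List.pyGet? (done ++ y :: rest') ((done.length : Int)) = some y := by
          rw [show ((done.length : Int)) = ((done.length : Nat) : Int) from rfl,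
              PySem.List.pyGet?_natCast]
          simp
        have := ih rest' (done ++ [y]) (if PySem.List.pyGet? (done ++ y :: rest') (done.length : Int) = some x then c + 1 else c) h
        simp only [List.append_assoc, List.cons_append, List.nil_append] at this
        rw [PySem.List.enumerate_cons, List.foldl_cons]
        have harg : ((done.length : Int) + 1) = (((done ++ [y]).length : Nat) : Int) := by
          simp
        rw [harg]
        rw [this]
        by_cases hxy : x = y
        · have hP : PySem.List.pyGet? (done ++ y :: rest') (done.length : Int) = some x := by
            rw [hget, hxy]
          rw [if_pos hP]
          simp [hxy]
          omega
        · have hP : PySem.List.pyGet? (done ++ y :: rest') (done.length : Int) ≠ some x := by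
            rw [hget]; simp [Ne.symm hxy]
          rw [if_neg hP]
          simp [hxy]

-- filtered-zip count equals length iff the equal-length lists are equal
theorem zip_count_iff (a b : List Char) (h : a.length = b.length) :
    (((a.zip b).filter (fun p => p.1 = p.2)).length = a.length) ↔ a = b := by
  induction a generalizing b with
  | nil => cases b <;> simp_all
  | cons x a' ih =>
      cases b with
      | nil => simp at h
      | cons y b' =>
        simp only [List.length_cons, Nat.succ_inj] at h
        have hle : ((a'.zip b').filter (fun p => p.1 = p.2)).length ≤ a'.length :=
          le_trans (List.length_filter_le _ _) (by rw [List.length_zip]; omega)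
        simp only [List.zip_cons_cons, List.filter_cons, List.length_cons]
        by_cases hxy : x = y
        · have hd : (decide ((x, y).1 = (x, y).2)) = true := by simp [hxy]
          rw [hd]
          simp only [if_true, List.length_cons]
          constructor
          · intro hlen
            have h2 : a' = b' := (ih b' h).mp (by omega)
            rw [hxy, h2]
          · intro he
            have h2 : a' = b' := by
              have := congrArg List.tail he
              simpa using this
            have := (ih b' h).mpr h2
            omega
        · have hd : (decide ((x, y).1 = (x, y).2)) = false := by simp [hxy]
          rw [hd]
          simp only [Bool.false_eq_true, if_false]
          constructor
          · intro hlen; omega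
          · intro he
            have : x = y := by
              have := congrArg (fun l => l.head?) he
              simpa using this
            exact absurd this hxy

theorem count_fold0 (a b : List Char) (h : a.length = b.length) :
    (PySem.List.enumerate a 0).foldl
        (fun c p => if PySem.List.pyGet? b p.1 = some p.2 then c + 1 else c) 0
      = ((a.zip b).filter (fun p => p.1 = p.2)).length := by
  have := count_fold a b [] 0 h
  simpa using this

-- ===== VERDICT (by name: the statement is the Claim_ definition above) =====
theorem comparaison_spec : Claim_equal_comparaison := by
  intro mot1 mot2 _hdom
  unfold Spec_comparaison comparaison comparaison_alt normaliseA
  rw [flatten_map_filter, flatten_map_filter]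
  rw [scanB_eq_filter, lower_filter_comm, lower_filter_comm]
  set n1 := PySem.Chars.lower (mot1.toList.filter (fun x => x ≠ ' ')) with hn1
  set n2 := PySem.Chars.lower (mot2.toList.filter (fun x => x ≠ ' ')) with hn2
  by_cases hlen : n1.length = n2.length
  · rw [if_neg (fun hh => hh hlen)]
    simp only [count_fold0 n1 n2 hlen]
    by_cases heq : n1 = n2
    · have hc := (zip_count_iff n1 n2 hlen).mpr heq
      have hc2 : ((n1.zip n2).filter (fun p => p.1 = p.2)).length = n2.length := hlen ▸ hc
      have hc3 : ((n2.zip n2).filter (fun p => p.1 = p.2)).length = n2.length := heq ▸ hc2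
      simp [heq, hc3]
    · have hne : ¬(((n1.zip n2).filter (fun p => p.1 = p.2)).length = n1.length ∧
          ((n1.zip n2).filter (fun p => p.1 = p.2)).length = n2.length) :=
        fun hh => heq ((zip_count_iff n1 n2 hlen).mp hh.1)
      rw [if_neg hne]
      simp [heq]
  · rw [if_pos hlen]
    have heq : n1 ≠ n2 := fun he => hlen (he ▸ rfl)
    simp [heq]
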